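-- pv_equiv track=rewrite | github.com/vasanthkumar7/Algorithm-visualizer | merge_sort_.py | getcolorarray
-- ===== SOURCE A (Python) =====
-- def getcolorarray(l,left,middle,right):
--     colorarray=[]
--
--     for i in range(l):
--         if i>=left and i<=right:
--             if i>=left and i<=middle:
--                 colorarray.append("yellow")
--             else:
--                 colorarray.append("#424bf5")
--         else:
--             colorarray.append("red")
--
--     return colorarray
-- ===== SOURCE B (Python) =====
-- def getcolorarray(l, left, middle, right):
--     n = max(l, 0)
--     lo = min(max(left, 0), n)
--     hi = max(min(right + 1, n), lo)
--     m = min(max(middle + 1, lo), hi)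
--     return ["red"] * lo + ["yellow"] * (m - lo) + ["#424bf5"] * (hi - m) + ["red"] * (n - hi)
-- ===== Notes on version B (the rewrite author's own statement) =====
-- stated objective: simpler
-- what changed: Replaces the per-index branching loop with one-time clamped boundary arithmetic that builds the four constant color segments (red/yellow/#424bf5/red) via list multiplication and concatenation.
import Mathlib
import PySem

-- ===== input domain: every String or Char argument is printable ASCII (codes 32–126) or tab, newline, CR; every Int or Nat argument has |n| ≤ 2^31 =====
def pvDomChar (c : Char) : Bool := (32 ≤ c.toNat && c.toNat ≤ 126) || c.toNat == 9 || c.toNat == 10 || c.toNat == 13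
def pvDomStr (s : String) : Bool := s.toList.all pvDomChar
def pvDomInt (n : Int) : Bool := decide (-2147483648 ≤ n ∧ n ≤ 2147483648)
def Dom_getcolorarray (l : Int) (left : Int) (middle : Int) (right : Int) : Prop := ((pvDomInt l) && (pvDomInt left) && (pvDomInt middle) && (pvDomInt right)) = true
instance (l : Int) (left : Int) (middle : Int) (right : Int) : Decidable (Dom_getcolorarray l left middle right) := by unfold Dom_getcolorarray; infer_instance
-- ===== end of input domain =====

-- B replaces A's per-index branching loop with one-time clamped boundary arithmetic producing four
-- constant color segments concatenated by list multiplication (objective: simpler decomposition).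

-- ===== PORT A =====
def getcolorarray (l : Int) (left : Int) (middle : Int) (right : Int) : List String :=
  (PySem.List.pyRange 0 l 1).foldl
    (fun colorarray i =>
      if left ≤ i ∧ i ≤ right then
        if left ≤ i ∧ i ≤ middle then colorarray ++ ["yellow"]
        else colorarray ++ ["#424bf5"]
      else colorarray ++ ["red"])
    []

-- ===== PORT B =====
def getcolorarray_alt (l : Int) (left : Int) (middle : Int) (right : Int) : List String :=
  let n := max l 0
  let lo := min (max left 0) n
  let hi := max (min (right + 1) n) lo
  let m := min (max (middle + 1) lo) hi
  PySem.List.pyRepeat ["red"] lo ++ PySem.List.pyRepeat ["yellow"] (m - lo) ++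
    PySem.List.pyRepeat ["#424bf5"] (hi - m) ++ PySem.List.pyRepeat ["red"] (n - hi)

-- ===== PRECONDITION & SPEC =====
def Spec_getcolorarray (l : Int) (left : Int) (middle : Int) (right : Int) (out : List String) : Prop := out = getcolorarray_alt l left middle right
instance (l : Int) (left : Int) (middle : Int) (right : Int) (out : List String) : Decidable (Spec_getcolorarray l left middle right out) := by unfold Spec_getcolorarray; infer_instance

-- ===== CLAIM (what is proved, stated in full; the proofs are below) =====
def Claim_equal_getcolorarray : Prop := ∀ (l : Int) (left : Int) (middle : Int) (right : Int), Dom_getcolorarray l left middle right → Spec_getcolorarray l left middle right (getcolorarray l left middle right)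

-- ===== LEMMAS AND PROOFS =====

-- mapping a function constant on [a,b) over range(a,b) gives a replicate block
theorem pv_map_pyRange_const (f : Int → String) (a b : Int) (c : String)
    (h : ∀ x, a ≤ x → x < b → f x = c) :
    (PySem.List.pyRange a b 1).map f = List.replicate (b - a).toNat c := by
  rw [List.eq_replicate_iff]
  constructor
  · simp [PySem.List.length_pyRange_one]
  · intro s hs
    rcases List.mem_map.mp hs with ⟨x, hx, rfl⟩
    rcases (PySem.List.mem_pyRange_one).mp hx with ⟨h1, h2⟩
    exact h x h1 h2

theorem getcolorarray_spec : Claim_equal_getcolorarray := by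
  intro l left middle right _
  unfold Spec_getcolorarray getcolorarray getcolorarray_alt
  set n := max l 0 with hn
  set lo := min (max left 0) n with hlo
  set hi := max (min (right + 1) n) lo with hhi
  set m := min (max (middle + 1) lo) hi with hm
  have hfun : (fun (colorarray : List String) (i : Int) =>
      if left ≤ i ∧ i ≤ right then
        if left ≤ i ∧ i ≤ middle then colorarray ++ ["yellow"]
        else colorarray ++ ["#424bf5"]
      else colorarray ++ ["red"])
      = (fun (colorarray : List String) (i : Int) => colorarray ++
          [if left ≤ i ∧ i ≤ right then
             (if left ≤ i ∧ i ≤ middle then "yellow" else "#424bf5")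
           else "red"]) := by
    funext acc i; split_ifs <;> rfl
  rw [hfun, PySem.List.foldl_append_singleton_eq_map, List.nil_append]
  have hrange : PySem.List.pyRange 0 l 1 = PySem.List.pyRange 0 n 1 := by
    by_cases h : 0 ≤ l
    · rw [hn, max_eq_left h]
    · rw [PySem.List.pyRange_one_eq_nil (by omega),
        PySem.List.pyRange_one_eq_nil (by omega)]
  have h1 : (0 : Int) ≤ lo := by omega
  have h2 : lo ≤ m := by omega
  have h3 : m ≤ hi := by omega
  have h4 : hi ≤ n := by omega
  rw [hrange, PySem.List.pyRange_one_append 0 lo n h1 (by omega),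
    PySem.List.pyRange_one_append lo m n h2 (by omega),
    PySem.List.pyRange_one_append m hi n h3 h4]
  simp only [List.map_append, List.append_assoc]
  rw [pv_map_pyRange_const _ 0 lo "red" (by intro x hx1 hx2; split_ifs <;> first | rfl | omega),
    pv_map_pyRange_const _ lo m "yellow" (by intro x hx1 hx2; split_ifs <;> first | rfl | omega),
    pv_map_pyRange_const _ m hi "#424bf5" (by intro x hx1 hx2; split_ifs <;> first | rfl | omega),
    pv_map_pyRange_const _ hi n "red" (by intro x hx1 hx2; split_ifs <;> first | rfl | omega)]
  simp only [PySem.List.pyRepeat_singleton, Int.sub_zero]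
  simp only [← hlo, ← hhi, ← hm]
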